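-- pv_equiv track=rewrite | github.com/NUsav77/Exercises | test/most_repeating_word.py | most_repeating_word
-- ===== SOURCE A (Python) =====
-- def most_repeating_word(test):
--     words = test.split()
--     max_count = 0
--     max_count_word = words[0]
--
--     for word in words:
--         for i in list(word):
--             if word.count(i) > max_count:
--                 max_count = word.count(i)
--                 max_count_word = word
--
--     return max_count_word
-- ===== SOURCE B (Python) =====
-- def most_repeating_word(test):
--     words = test.split()
--
--     def score(word):
--         # max char frequency = longest run of equal chars in the sorted word
--         s = sorted(word)
--         best = run = 1 if s else 0
--         for a, b in zip(s, s[1:]):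
--             run = run + 1 if a == b else 1
--             best = max(best, run)
--         return best
--
--     return max(words, key=score)
-- ===== Notes on version B (the rewrite author's own statement) =====
-- stated objective: alternative
-- what changed: Each word's score is computed by sorting its characters and scanning the sorted sequence for the longest run of equal adjacent characters (which equals the max character frequency), and the winner is picked with max(words, key=score) (first-wins, like A's strict >), replacing A's per-character word.count scans inside a running-max loop.
import Mathlib
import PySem

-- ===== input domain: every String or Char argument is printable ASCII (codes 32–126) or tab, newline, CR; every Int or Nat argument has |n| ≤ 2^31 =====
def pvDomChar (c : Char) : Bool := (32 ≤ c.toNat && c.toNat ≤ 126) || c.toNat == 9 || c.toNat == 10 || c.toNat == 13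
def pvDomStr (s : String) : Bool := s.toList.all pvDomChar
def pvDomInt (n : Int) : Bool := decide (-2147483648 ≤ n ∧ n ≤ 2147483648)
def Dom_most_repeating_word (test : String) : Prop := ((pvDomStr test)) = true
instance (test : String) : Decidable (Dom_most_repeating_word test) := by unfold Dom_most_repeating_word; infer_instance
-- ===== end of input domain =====

-- B scores each word by sorting its characters and scanning the sorted sequence for the
-- longest run of equal adjacent characters (= the max character frequency), then picks the
-- first word with maximal score via max(words, key=score), replacing A's per-character
-- word.count scans; same first-wins result.

-- ===== PORT A =====
def most_repeating_word (test : String) : String :=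
  let words := PySem.Chars.split₀ test.toList
  match words with
  | [] => ""   -- Python raises IndexError at words[0]; excluded by Pre_
  | w0 :: _ =>
    let r := words.foldl
      (fun (st : Int × List Char) word =>
        word.foldl
          (fun st c =>
            -- word.count(i) with i a 1-char string is the character count
            if (PySem.List.count word c : Int) > st.1
            then ((PySem.List.count word c : Int), word) else st)
          st)
      (0, w0)
    String.ofList r.2

-- ===== PORT B =====
-- score(word): sorted(word), then longest run of equal adjacent chars over zip(s, s[1:])
def pvScoreB (word : List Char) : Int :=
  let s := PySem.List.sorted word (fun c => c) false
  match s with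
  | [] => 0   -- best = run = 0, empty loop
  | _ :: _ =>
    ((s.zip s.tail).foldl       -- s.tail = s[1:] for nonempty s
      (fun (st : Int × Int) p =>
        let run := if p.1 = p.2 then st.2 + 1 else 1
        (max st.1 run, run))
      (1, 1)).1

def most_repeating_word_alt (test : String) : String :=
  let words := PySem.Chars.split₀ test.toList
  match words with
  | [] => ""   -- Python max(()) raises ValueError; excluded by Pre_
  | w0 :: rest =>
    -- max(words, key=score): keep the first-wins best and its key
    let r := rest.foldl
      (fun (st : List Char × Int) w =>
        let k := pvScoreB w
        if k > st.2 then (w, k) else st)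
      (w0, pvScoreB w0)
    String.ofList r.1

-- ===== PRECONDITION & SPEC =====
-- Pre_ excludes exactly the inputs with no words (empty/whitespace-only test), where A raises
-- IndexError at words[0] (and B's max(words) raises ValueError).
def Pre_most_repeating_word (test : String) : Prop := PySem.Chars.split₀ test.toList ≠ []
instance (test : String) : Decidable (Pre_most_repeating_word test) := by unfold Pre_most_repeating_word; infer_instance
def pvWitness_most_repeating_word : String := "abca bb"
def Spec_most_repeating_word (test : String) (out : String) : Prop := out = most_repeating_word_alt test
instance (test : String) (out : String) : Decidable (Spec_most_repeating_word test out) := by unfold Spec_most_repeating_word; infer_instance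

-- ===== CLAIM (what is proved, stated in full; the proofs are below) =====
def Claim_equal_most_repeating_word : Prop := ∀ (test : String), Dom_most_repeating_word test → Pre_most_repeating_word test → Spec_most_repeating_word test (most_repeating_word test)

-- ===== LEMMAS AND PROOFS =====

-- A's per-word score: running max of character counts of `word` over l, from m
def pvMg (word : List Char) (l : List Char) (m : Int) : Int :=
  l.foldl (fun a c => max a (PySem.List.count word c : Int)) m

-- A's inner loop over l, counting in word, is a running max with a first-strict-improvement word update
theorem pvInnerA (word : List Char) :
    ∀ (l : List Char) (mc : Int) (mw : List Char),
      l.foldl (fun st c =>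
        if (PySem.List.count word c : Int) > st.1
        then ((PySem.List.count word c : Int), word) else st) (mc, mw)
      = (pvMg word l mc, if pvMg word l mc > mc then word else mw) := by
  intro l
  induction l with
  | nil => intro mc mw; simp [pvMg]
  | cons c t ih =>
    intro mc mw
    by_cases h : (PySem.List.count word c : Int) > mc
    · simp only [List.foldl_cons, if_pos h]
      rw [ih]
      have hmax : max mc (PySem.List.count word c : Int) = (PySem.List.count word c : Int) :=
        max_eq_right (le_of_lt h)
      simp only [pvMg, List.foldl_cons, hmax]
      have hle : (PySem.List.count word c : Int)
          ≤ List.foldl (fun a c => max a (PySem.List.count word c : Int))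
              ((PySem.List.count word c : Int)) t :=
        (PySem.List.le_foldl_max_int t _ _).1
      rw [ite_self, if_pos (lt_of_lt_of_le h hle)]
    · simp only [List.foldl_cons, if_neg h]
      rw [ih]
      have hmax : max mc (PySem.List.count word c : Int) = mc :=
        max_eq_left (not_lt.mp h)
      simp only [pvMg, List.foldl_cons, hmax]
      rfl

-- a running max started at `max m m'` splits off m
theorem pvMaxSplit (f : Char → Int) :
    ∀ (l : List Char) (m m' : Int),
      l.foldl (fun a c => max a (f c)) (max m m')
      = max m (l.foldl (fun a c => max a (f c)) m') := by
  intro l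
  induction l with
  | nil => intro m m'; rfl
  | cons c t ih =>
    intro m m'
    simp only [List.foldl_cons, max_assoc]
    exact ih m (max m' (f c))

-- an upper bound on init and on every projected term bounds the running max
theorem pvFoldMaxLe (f : Char → Int) :
    ∀ (l : List Char) (init b : Int), init ≤ b → (∀ c ∈ l, f c ≤ b) →
      l.foldl (fun a c => max a (f c)) init ≤ b := by
  intro l
  induction l with
  | nil => intro init b h _; exact h
  | cons c t ih =>
    intro init b h hb
    simp only [List.foldl_cons]
    exact ih _ b (max_le h (hb c List.mem_cons_self)) fun x hx => hb x (List.mem_cons_of_mem c hx)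

-- the 0-based running max of a projection depends only on which characters occur
theorem pvFoldCongrMem (f : Char → Int) (l₁ l₂ : List Char)
    (h : ∀ c, c ∈ l₁ ↔ c ∈ l₂) :
    l₁.foldl (fun a c => max a (f c)) 0 = l₂.foldl (fun a c => max a (f c)) 0 := by
  have key : ∀ (u v : List Char), (∀ c, c ∈ u → c ∈ v) →
      u.foldl (fun a c => max a (f c)) 0 ≤ v.foldl (fun a c => max a (f c)) 0 := by
    intro u v huv
    exact pvFoldMaxLe f u 0 _ (PySem.List.le_foldl_max_int v f 0).1
      (fun c hc => (PySem.List.le_foldl_max_int v f 0).2 c (huv c hc))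
  exact le_antisymm (key l₁ l₂ fun c => (h c).mp) (key l₂ l₁ fun c => (h c).mpr)

-- longest-run recursion: value of B's run scan after the current run has length `run`
def pvRun (prev : Char) : List Char → Int → Int
  | [], run => run
  | y :: r, run => if prev = y then pvRun prev r (run + 1) else max run (pvRun y r 1)

theorem pvRun_ge : ∀ (t : List Char) (prev : Char) (run : Int), run ≤ pvRun prev t run := by
  intro t
  induction t with
  | nil => intro prev run; exact le_refl _
  | cons y r ih =>
    intro prev run
    by_cases h : prev = y
    · simp only [pvRun, if_pos h]
      exact le_trans (by omega) (ih prev (run + 1))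
    · simp only [pvRun, if_neg h]
      exact le_max_left _ _

-- B's fold over zip(s, s[1:]) computes max best (pvRun …)
theorem pvScanEq :
    ∀ (t : List Char) (prev : Char) (best run : Int), 1 ≤ run → run ≤ best →
      (((prev :: t).zip t).foldl
        (fun (st : Int × Int) p =>
          let run := if p.1 = p.2 then st.2 + 1 else 1
          (max st.1 run, run)) (best, run)).1
      = max best (pvRun prev t run) := by
  intro t
  induction t with
  | nil =>
    intro prev best run h1 h2
    simp only [List.zip_nil_right, List.foldl_nil, pvRun]
    exact (max_eq_left h2).symm
  | cons y r ih =>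
    intro prev best run h1 h2
    simp only [List.zip_cons_cons, List.foldl_cons]
    by_cases h : prev = y
    · simp only [if_pos h, pvRun]
      rw [ih y (max best (run + 1)) (run + 1) (by omega) (le_max_right _ _)]
      subst h
      have hge : run + 1 ≤ pvRun prev r (run + 1) := pvRun_ge r prev (run + 1)
      rw [max_assoc, max_eq_right hge]
    · simp only [if_neg h, pvRun]
      rw [ih y (max best 1) 1 (le_refl _) (le_max_right _ _)]
      rw [max_eq_left (le_trans h1 h2), ← max_assoc, max_eq_left h2]

-- running max of counts-within-t over t itself, from 0
def pvMgC (t : List Char) : Int := t.foldl (fun a c => max a (List.count c t : Int)) 0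

theorem pvMgC_nonneg (t : List Char) : 0 ≤ pvMgC t :=
  (PySem.List.le_foldl_max_int t _ 0).1

theorem pvMgC_le (t : List Char) (b : Int) (h0 : 0 ≤ b)
    (h : ∀ c ∈ t, (List.count c t : Int) ≤ b) : pvMgC t ≤ b :=
  pvFoldMaxLe _ t 0 b h0 h

theorem pvMgC_mem_le (t : List Char) (c : Char) (h : c ∈ t) : (List.count c t : Int) ≤ pvMgC t :=
  (PySem.List.le_foldl_max_int t _ 0).2 c h

theorem pvMgC_cons_le (y : Char) (r : List Char) : pvMgC r ≤ pvMgC (y :: r) := by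
  apply pvMgC_le r _ (pvMgC_nonneg _)
  intro c hc
  calc (List.count c r : Int) ≤ (List.count c (y :: r) : Int) := by
        rw [List.count_cons]; push_cast; split <;> omega
    _ ≤ pvMgC (y :: r) := pvMgC_mem_le _ c (List.mem_cons_of_mem y hc)

-- peeling the head off pvMgC
theorem pvMgC_cons_eq (y : Char) (r : List Char) :
    pvMgC (y :: r) = max ((List.count y (y :: r) : Int)) (pvMgC r) := by
  apply le_antisymm
  · apply pvMgC_le _ _ (le_trans (by positivity) (le_max_left _ _))
    intro c hc
    rcases List.mem_cons.mp hc with rfl | hc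
    · exact le_max_left _ _
    · by_cases hcy : c = y
      · subst hcy; exact le_max_left _ _
      · have : (List.count c (y :: r) : Int) = (List.count c r : Int) := by
          rw [List.count_cons]; push_cast; split
          · rename_i hb; exact absurd (id (by simpa using hb : y = c)).symm hcy
          · omega
        rw [this]
        exact le_trans (pvMgC_mem_le r c hc) (le_max_right _ _)
  · exact max_le (pvMgC_mem_le _ y List.mem_cons_self) (pvMgC_cons_le y r)

-- in a sorted list, pvRun computes the max count: current run + remaining count of prev, vs max count in the rest
theorem pvRunCount :
    ∀ (t : List Char) (prev : Char) (run : Int), (prev :: t).Pairwise (· ≤ ·) → 1 ≤ run →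
      pvRun prev t run = max (run + (List.count prev t : Int)) (pvMgC t) := by
  intro t
  induction t with
  | nil =>
    intro prev run _ h1
    simp only [pvRun, pvMgC, List.count_nil, List.foldl_nil]
    push_cast
    omega
  | cons y r ih =>
    intro prev run hp h1
    have hp' : (y :: r).Pairwise (· ≤ ·) := hp.of_cons
    by_cases h : prev = y
    · subst h
      have hpr : (prev :: r).Pairwise (· ≤ ·) := by
        rcases List.pairwise_cons.mp hp with ⟨hall, hpr'⟩
        exact List.pairwise_cons.mpr ⟨fun c hc => hall c (List.mem_cons_of_mem prev hc), hpr'.of_cons⟩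
      have e : pvRun prev (prev :: r) run = pvRun prev r (run + 1) := by simp [pvRun]
      have hc1 : (List.count prev (prev :: r) : Int) = (List.count prev r : Int) + 1 := by
        rw [List.count_cons_self]; push_cast; ring
      rw [e, ih prev (run + 1) hpr (by omega), pvMgC_cons_eq, hc1, ← max_assoc,
        max_eq_left (by omega : ((List.count prev r : Int) + 1) ≤ run + ((List.count prev r : Int) + 1))]
      congr 1
      omega
    · -- prev < every element of y :: r, so count prev (y :: r) = 0
      have hlt : ∀ c ∈ y :: r, prev < c := by
        intro c hc
        have hle : prev ≤ c := (List.pairwise_cons.mp hp).1 c hc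
        rcases List.mem_cons.mp hc with rfl | hc
        · exact lt_of_le_of_ne hle h
        · have hy : prev ≤ y := (List.pairwise_cons.mp hp).1 y List.mem_cons_self
          have hyc : y ≤ c := (List.pairwise_cons.mp hp').1 c hc
          exact lt_of_lt_of_le (lt_of_le_of_ne hy h) hyc
      have hcnt0 : List.count prev (y :: r) = 0 := by
        rw [List.count_eq_zero]
        intro hmem
        exact absurd rfl (ne_of_lt (hlt prev hmem)).symm
      have e : pvRun prev (y :: r) run = max run (pvRun y r 1) := by simp [pvRun, h]
      have hc1 : (List.count y (y :: r) : Int) = 1 + (List.count y r : Int) := by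
        rw [List.count_cons_self]; push_cast; ring
      rw [e, ih y 1 hp' (le_refl _), hcnt0, pvMgC_cons_eq, hc1]
      push_cast
      rw [add_zero]

-- for any list, the running max of counts-in-(prev::t) over prev::t equals max (1 + count prev t) (pvMgC t)
theorem pvMgS_cons (prev : Char) (t : List Char) :
    (prev :: t).foldl (fun a c => max a (List.count c (prev :: t) : Int)) 0
      = max (1 + (List.count prev t : Int)) (pvMgC t) := by
  have hc1 : (List.count prev (prev :: t) : Int) = 1 + (List.count prev t : Int) := by
    rw [List.count_cons_self]; push_cast; ring
  have hT : t.foldl (fun a c => max a (List.count c (prev :: t) : Int)) 0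
      ≤ max (1 + (List.count prev t : Int)) (pvMgC t) := by
    apply pvFoldMaxLe _ t 0 _ (le_trans (by omega) (le_max_left _ _))
    intro c hc
    by_cases hcy : c = prev
    · subst hcy; rw [hc1]; exact le_max_left _ _
    · have hce : (List.count c (prev :: t) : Int) = (List.count c t : Int) := by
        rw [List.count_cons]; push_cast; split
        · rename_i hb; exact absurd (id (by simpa using hb : prev = c)).symm hcy
        · omega
      rw [hce]
      exact le_trans (pvMgC_mem_le t c hc) (le_max_right _ _)
  have hT2 : pvMgC t ≤ t.foldl (fun a c => max a (List.count c (prev :: t) : Int)) 0 := by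
    apply pvMgC_le _ _ (PySem.List.le_foldl_max_int t _ 0).1
    intro c hc
    refine le_trans ?_ ((PySem.List.le_foldl_max_int t _ 0).2 c hc)
    rw [List.count_cons]; push_cast; split <;> omega
  simp only [List.foldl_cons]
  rw [max_comm (0 : Int) _, pvMaxSplit (fun c => (List.count c (prev :: t) : Int)) t, hc1]
  exact le_antisymm (max_le (le_max_left _ _) hT)
    (max_le (le_max_left _ _) (le_trans hT2 (le_max_right _ _)))

-- B's sort-and-scan score equals A's max character count
theorem pvScoreEq (word : List Char) : pvScoreB word = pvMg word word 0 := by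
  unfold pvScoreB pvMg
  have hperm : (PySem.List.sorted word (fun c => c) false).Perm word :=
    PySem.List.sorted_perm word _ false
  have hmem : ∀ c, c ∈ PySem.List.sorted word (fun c => c) false ↔ c ∈ word :=
    fun c => hperm.mem_iff
  have hpw : (PySem.List.sorted word (fun c => c) false).Pairwise (· ≤ ·) := by
    have := PySem.List.sorted_pairwise word (fun c => c)
    simpa using this
  have hcw : ∀ (l : List Char) (m : Int),
      l.foldl (fun a c => max a (PySem.List.count word c : Int)) m
      = l.foldl (fun a c => max a ((List.count c word : Nat) : Int)) m := by
    intro l m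
    congr 1
  rw [hcw]
  cases hs : PySem.List.sorted word (fun c => c) false with
  | nil =>
    have hw : word = [] := (PySem.List.sorted_eq_nil_iff word _ false).mp hs
    subst hw
    rfl
  | cons prev t =>
    rw [hs] at hperm hmem hpw
    simp only [List.tail_cons]
    rw [pvScanEq t prev 1 1 (le_refl _) (le_refl _)]
    rw [max_eq_right (pvRun_ge t prev 1)]
    rw [pvRunCount t prev 1 hpw (le_refl _)]
    rw [← pvMgS_cons]
    have hcnt : ∀ c, (List.count c (prev :: t) : Int) = (List.count c word : Int) := by
      intro c
      rw [hperm.count_eq]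
    have hfun : (fun (a : Int) c => max a (List.count c (prev :: t) : Int))
        = (fun (a : Int) c => max a (List.count c word : Int)) := by
      funext a c
      rw [hcnt]
    rw [hfun]
    exact pvFoldCongrMem _ _ _ hmem

-- the two outer loops correspond (A's state is (count, word), B's is (word, key))
theorem pvOuter :
    ∀ (ws : List (List Char)) (mc : Int) (mw : List Char), 0 ≤ mc →
      ws.foldl (fun (st : Int × List Char) word =>
        word.foldl (fun st c =>
          if (PySem.List.count word c : Int) > st.1
          then ((PySem.List.count word c : Int), word) else st) st) (mc, mw)
      = ((ws.foldl (fun (st : List Char × Int) w =>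
            let k := pvScoreB w
            if k > st.2 then (w, k) else st) (mw, mc)).2,
         (ws.foldl (fun (st : List Char × Int) w =>
            let k := pvScoreB w
            if k > st.2 then (w, k) else st) (mw, mc)).1) := by
  intro ws
  induction ws with
  | nil => intro mc mw _; rfl
  | cons word rest ih =>
    intro mc mw hmc
    simp only [List.foldl_cons]
    rw [pvInnerA]
    have hsplit : pvMg word word mc = max mc (pvScoreB word) := by
      rw [pvScoreEq]
      have h0 : max mc (0 : Int) = mc := max_eq_left hmc
      calc pvMg word word mc = pvMg word word (max mc 0) := by rw [h0]
        _ = max mc (pvMg word word 0) := pvMaxSplit _ word mc 0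
    by_cases h : pvScoreB word > mc
    · rw [hsplit, max_eq_right (le_of_lt h), if_pos h, if_pos h]
      have h0 : 0 ≤ pvScoreB word := le_trans hmc (le_of_lt h)
      exact ih _ _ h0
    · rw [hsplit, max_eq_left (not_lt.mp h), if_neg (lt_irrefl mc), if_neg h]
      exact ih _ _ hmc

-- ===== VERDICT (by name: the statement is the Claim_ definition above) =====
theorem most_repeating_word_spec : Claim_equal_most_repeating_word := by
  intro test _ hpre
  unfold Spec_most_repeating_word most_repeating_word most_repeating_word_alt
  cases hws : PySem.Chars.split₀ test.toList with
  | nil => exact absurd hws hpre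
  | cons w0 rest =>
    simp only [List.foldl_cons]
    rw [pvInnerA w0 w0 0 w0, ite_self]
    have h0 : 0 ≤ pvMg w0 w0 0 := (PySem.List.le_foldl_max_int w0 _ 0).1
    rw [pvOuter rest (pvMg w0 w0 0) w0 h0, ← pvScoreEq]
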